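-- pv_equiv track=rewrite | github.com/WojtekReu/advent_of_code | 2022/day05.py | stock_gen
-- ===== SOURCE A (Python) =====
-- def stock_gen(container):
--     for i in range(7, -1, -1):
--         for stock in container:
--             if i < len(stock):
--                 yield stock[i]
--             else:
--                 yield "-"
--         yield "\n"
-- ===== SOURCE B (Python) =====
-- def stock_gen(container):
--     # Pad each stock to 8 entries, transpose into rows, then emit rows top-down.
--     padded = [list(stock[:8]) + ["-"] * (8 - min(len(stock), 8)) for stock in container]
--     rows = [[col[i] for col in padded] for i in range(8)]
--     for row in reversed(rows):
--         yield from row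
--         yield "\n"
-- ===== Notes on version B (the rewrite author's own statement) =====
-- stated objective: alternative
-- what changed: B pads every stock to height 8 once, builds the transposed table of rows, and then emits the reversed rows in a separate pass, instead of re-testing i < len(stock) for every stock inside the index loop.
import Mathlib
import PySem

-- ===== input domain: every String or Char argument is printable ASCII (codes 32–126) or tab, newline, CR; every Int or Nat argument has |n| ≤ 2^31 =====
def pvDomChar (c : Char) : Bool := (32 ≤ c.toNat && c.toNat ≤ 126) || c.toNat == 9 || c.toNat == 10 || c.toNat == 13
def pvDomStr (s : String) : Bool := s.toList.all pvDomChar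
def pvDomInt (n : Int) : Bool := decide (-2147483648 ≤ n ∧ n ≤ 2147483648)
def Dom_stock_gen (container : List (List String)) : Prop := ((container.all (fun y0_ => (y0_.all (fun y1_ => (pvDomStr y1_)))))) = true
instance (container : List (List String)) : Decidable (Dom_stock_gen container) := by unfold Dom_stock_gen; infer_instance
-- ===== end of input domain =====

-- B pads every stock to height 8 once and emits the transposed rows in a second pass,
-- instead of re-testing i < len(stock) inside the index loop; alternative decomposition, same cost.

-- ===== PORT A =====
def stock_gen (container : List (List String)) : List String :=
  (PySem.List.pyRange 7 (-1) (-1)).foldl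
    (fun acc i =>
      (container.foldl
        (fun acc2 stock =>
          acc2 ++ [if i < (stock.length : Int) then (PySem.List.pyGet? stock i).getD "-" else "-"])
        acc) ++ ["\n"])
    []

-- ===== PORT B =====
def stock_gen_alt (container : List (List String)) : List String :=
  let padded := container.map
    (fun stock => PySem.List.slice stock none (some 8) ++ List.replicate (8 - min stock.length 8) "-")
  let rows := (List.range 8).map
    (fun i => padded.map (fun col => (PySem.List.pyGet? col (i : Int)).getD ""))
  rows.reverse.foldl (fun acc row => acc ++ row ++ ["\n"]) []

-- ===== PRECONDITION & SPEC =====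
def Spec_stock_gen (container : List (List String)) (out : List String) : Prop := out = stock_gen_alt container
instance (container : List (List String)) (out : List String) : Decidable (Spec_stock_gen container out) := by unfold Spec_stock_gen; infer_instance

-- ===== CLAIM (what is proved, stated in full; the proofs are below) =====
def Claim_equal_stock_gen : Prop := ∀ (container : List (List String)), Dom_stock_gen container → Spec_stock_gen container (stock_gen container)

-- ===== LEMMAS AND PROOFS =====

-- one padded cell equals A's guarded access, for any row index below 8
lemma pad_get (stock : List String) (i : Int) (h0 : 0 ≤ i) (h8 : i < 8) :
    ((PySem.List.pyGet?
        (PySem.List.slice stock none (some 8) ++ List.replicate (8 - min stock.length 8) "-") i).getD "")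
    = if i < (stock.length : Int) then (PySem.List.pyGet? stock i).getD "-" else "-" := by
  obtain ⟨n, rfl⟩ := Int.eq_ofNat_of_zero_le h0
  rw [PySem.List.slice_to stock (by norm_num : (0:Int) ≤ 8)]
  have h8' : n < 8 := by exact_mod_cast h8
  simp only [PySem.List.pyGet?_natCast]
  rw [show (8:Int).toNat = 8 from rfl]
  by_cases hl : n < stock.length
  · have ht : n < (stock.take 8).length := by simp [List.length_take]; omega
    rw [List.getElem?_append_left ht]
    simp [h8', hl, Nat.cast_lt]
  · have hle : stock.length ≤ n := Nat.le_of_not_lt hl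
    have htake : List.take 8 stock = stock := List.take_of_length_le (by omega)
    rw [htake, List.getElem?_append_right hle]
    have hidx : n - stock.length < 8 - min stock.length 8 := by omega
    simp [hidx, hl, Nat.cast_lt]

lemma row_eq (container : List (List String)) (i : Int) (h0 : 0 ≤ i) (h8 : i < 8) :
    container.foldl
      (fun acc2 stock =>
        acc2 ++ [if i < (stock.length : Int) then (PySem.List.pyGet? stock i).getD "-" else "-"]) acc
    = acc ++ (container.map
        (fun stock => PySem.List.slice stock none (some 8) ++
          List.replicate (8 - min stock.length 8) "-")).map
        (fun col => (PySem.List.pyGet? col i).getD "") := by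
  rw [PySem.List.foldl_append_singleton_eq_map, List.map_map]
  congr 1
  apply List.map_congr_left
  intro stock _
  exact (pad_get stock i h0 h8).symm

-- ===== VERDICT (by name: the statement is the Claim_ definition above) =====
theorem stock_gen_spec : Claim_equal_stock_gen := by
  intro container _
  show stock_gen container = stock_gen_alt container
  unfold stock_gen stock_gen_alt
  have hr : PySem.List.pyRange 7 (-1) (-1) = [7, 6, 5, 4, 3, 2, 1, 0] := by decide
  have hn : List.range 8 = [0, 1, 2, 3, 4, 5, 6, 7] := by decide
  rw [hr, hn]
  simp only [List.foldl]
  rw [row_eq container 7 (by norm_num) (by norm_num),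
      row_eq container 6 (by norm_num) (by norm_num),
      row_eq container 5 (by norm_num) (by norm_num),
      row_eq container 4 (by norm_num) (by norm_num),
      row_eq container 3 (by norm_num) (by norm_num),
      row_eq container 2 (by norm_num) (by norm_num),
      row_eq container 1 (by norm_num) (by norm_num),
      row_eq container 0 (by norm_num) (by norm_num)]
  simp [List.append_assoc]
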